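-- pv_equiv track=rewrite | github.com/surajpanwar26/Hunter-pro | modules/resumes/generator.py | highlight_matching_skills
-- ===== SOURCE A (Python) =====
-- def highlight_matching_skills(user_skills: list, job_skills: list) -> list:
--     """
--     Returns skills that match between user's skills and job requirements.
--
--     Args:
--         user_skills: List of user's skills
--         job_skills: List of skills required by job
--
--     Returns:
--         List of matching skills (prioritized)
--     """
--     if not job_skills:
--         return user_skills
--
--     matching = []
--     non_matching = []
--
--     for skill in user_skills:
--         skill_lower = skill.lower()
--         # Check if any job skill matches
--         if any(skill_lower in js.lower() or js.lower() in skill_lower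
--                for js in job_skills):
--             matching.append(skill)
--         else:
--             non_matching.append(skill)
--
--     # Return matching skills first, then others
--     return matching + non_matching
-- ===== SOURCE B (Python) =====
-- def highlight_matching_skills(user_skills: list, job_skills: list) -> list:
--     """Same contract as A: skills matching a job skill (by substring either way,
--     case-insensitive) come first, others after, each group in original order."""
--     if not job_skills:
--         return user_skills
--     job_lower = [js.lower() for js in job_skills]
--
--     def matches(skill):
--         sl = skill.lower()
--         return any(sl in js or js in sl for js in job_lower)
--
--     # stable sort by boolean key floats matching skills to the front,
--     # preserving each group's original order
--     return sorted(user_skills, key=lambda s: not matches(s))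
-- ===== Notes on version B (the rewrite author's own statement) =====
-- stated objective: idiomatic
-- what changed: Replaces the explicit two-bucket loop with concatenation by a single stable sort of user_skills keyed on the boolean 'does not match', with the job skills lowercased once up front instead of re-lowercased inside every inner comparison.
import Mathlib
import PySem

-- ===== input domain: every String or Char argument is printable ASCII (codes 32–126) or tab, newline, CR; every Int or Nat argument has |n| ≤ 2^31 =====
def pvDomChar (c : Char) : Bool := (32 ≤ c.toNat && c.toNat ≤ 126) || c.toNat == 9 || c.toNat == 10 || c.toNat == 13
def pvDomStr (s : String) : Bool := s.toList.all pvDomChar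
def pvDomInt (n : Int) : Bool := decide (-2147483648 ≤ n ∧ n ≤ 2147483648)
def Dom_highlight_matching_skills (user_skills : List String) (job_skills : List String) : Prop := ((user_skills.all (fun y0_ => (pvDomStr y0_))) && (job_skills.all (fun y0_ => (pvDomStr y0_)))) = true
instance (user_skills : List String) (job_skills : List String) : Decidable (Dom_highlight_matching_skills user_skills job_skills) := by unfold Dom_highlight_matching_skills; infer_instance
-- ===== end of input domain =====

-- B replaces A's explicit two-bucket loop with a single stable sort by a boolean
-- "does not match" key (idiomatic; same asymptotic cost).


-- ===== PORT A =====
def highlight_matching_skills (user_skills : List String) (job_skills : List String) : List String :=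
  if job_skills = [] then user_skills
  else
    let r := user_skills.foldl (fun (acc : List String × List String) skill =>
      let skill_lower := PySem.Str.lower skill
      if job_skills.any (fun js =>
          PySem.Str.isIn skill_lower (PySem.Str.lower js) ||
          PySem.Str.isIn (PySem.Str.lower js) skill_lower)
      then (acc.1 ++ [skill], acc.2)
      else (acc.1, acc.2 ++ [skill])) ([], [])
    r.1 ++ r.2

-- ===== PORT B =====
-- matches(skill) over the precomputed lowercased job skills
def hms_matches (job_lower : List String) (skill : String) : Bool :=
  let sl := PySem.Str.lower skill
  job_lower.any (fun js => PySem.Str.isIn sl js || PySem.Str.isIn js sl)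

def highlight_matching_skills_alt (user_skills : List String) (job_skills : List String) : List String :=
  if job_skills = [] then user_skills
  else
    let job_lower := job_skills.map PySem.Str.lower
    PySem.List.sorted user_skills (fun s => !hms_matches job_lower s) false

-- ===== PRECONDITION & SPEC =====
def Spec_highlight_matching_skills (user_skills : List String) (job_skills : List String) (out : List String) : Prop := out = highlight_matching_skills_alt user_skills job_skills
instance (user_skills : List String) (job_skills : List String) (out : List String) : Decidable (Spec_highlight_matching_skills user_skills job_skills out) := by unfold Spec_highlight_matching_skills; infer_instance

-- ===== CLAIM (what is proved, stated in full; the proofs are below) =====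
def Claim_equal_highlight_matching_skills : Prop := ∀ (user_skills : List String) (job_skills : List String), Dom_highlight_matching_skills user_skills job_skills → Spec_highlight_matching_skills user_skills job_skills (highlight_matching_skills user_skills job_skills)

-- ===== LEMMAS AND PROOFS =====

-- inserting x when the comparator rejects every element of ms but accepts the head
-- region ns: x lands exactly between them (stable-insertion step)
theorem hms_insertBy_between {α : Type} (before : α → α → Bool) (x : α)
    (ms ns : List α) (h1 : ∀ y ∈ ms, before x y = false) (h2 : ∀ y ∈ ns, before x y = true) :
    PySem.List.insertBy before x (ms ++ ns) = ms ++ x :: ns := by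
  induction ms with
  | nil =>
    cases ns with
    | nil => simp [PySem.List.insertBy]
    | cons n t => simp [PySem.List.insertBy, h2 n (by simp)]
  | cons m ms ih =>
    have hm : before x m = false := h1 m (by simp)
    simp only [List.cons_append, PySem.List.insertBy, hm, Bool.false_eq_true, if_false,
      List.cons.injEq, true_and]
    exact ih (fun y hy => h1 y (by simp [hy]))

-- the insertion-sort fold with a Bool key partitions: false-key elements first
theorem hms_foldl_insertBy_partition {α : Type} (key : α → Bool) (xs ms ns : List α)
    (hm : ∀ y ∈ ms, key y = false) (hn : ∀ y ∈ ns, key y = true) :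
    xs.foldl (fun acc x => PySem.List.insertBy (fun a b => decide (key a < key b)) x acc) (ms ++ ns)
      = (ms ++ xs.filter (fun x => !key x)) ++ (ns ++ xs.filter key) := by
  induction xs generalizing ms ns with
  | nil => simp
  | cons x xs ih =>
    by_cases hx : key x = true
    · have hins : PySem.List.insertBy (fun a b => decide (key a < key b)) x (ms ++ ns)
          = ms ++ (ns ++ [x]) := by
        have h := hms_insertBy_between (fun a b => decide (key a < key b)) x (ms ++ ns) []
          (fun y _ => by show decide (key x < key y) = false; rw [hx]; cases key y <;> decide)
          (by simp)
        simpa using h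
      simp only [List.foldl_cons, hins]
      rw [ih ms (ns ++ [x]) hm (by intro y hy; rcases List.mem_append.1 hy with h | h
                                   · exact hn y h
                                   · simp at h; simpa [h] using hx)]
      simp [hx]
    · have hx' : key x = false := by simpa using hx
      have hins : PySem.List.insertBy (fun a b => decide (key a < key b)) x (ms ++ ns)
          = (ms ++ [x]) ++ ns := by
        rw [List.append_assoc]
        apply hms_insertBy_between
        · intro y hy; simp [hx', hm y hy]
        · intro y hy; simp [hx', hn y hy]
      simp only [List.foldl_cons, hins]
      rw [ih (ms ++ [x]) ns (by intro y hy; rcases List.mem_append.1 hy with h | h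
                                · exact hm y h
                                · simp at h; simpa [h] using hx') hn]
      simp [hx']

-- stable sort by a Bool key = the false-key elements then the true-key elements
theorem hms_sorted_bool_key {α : Type} (key : α → Bool) (xs : List α) :
    PySem.List.sorted xs key false = xs.filter (fun x => !key x) ++ xs.filter key := by
  rw [PySem.List.sorted_eq_foldl_insertBy]
  simpa using hms_foldl_insertBy_partition key xs [] [] (by simp) (by simp)

-- A's bucket loop computes the two filters
theorem hms_foldl_buckets (p : String → Bool) (xs : List String) (m n : List String) :
    xs.foldl (fun (acc : List String × List String) skill =>
        if p skill then (acc.1 ++ [skill], acc.2) else (acc.1, acc.2 ++ [skill])) (m, n)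
      = (m ++ xs.filter p, n ++ xs.filter (fun x => !p x)) := by
  induction xs generalizing m n with
  | nil => simp
  | cons x xs ih =>
    by_cases hx : p x = true <;>
      simp [hx, ih]

-- ===== VERDICT (by name: the statement is the Claim_ definition above) =====
theorem highlight_matching_skills_spec : Claim_equal_highlight_matching_skills := by
  intro user_skills job_skills _
  show _ = _
  unfold highlight_matching_skills highlight_matching_skills_alt
  by_cases hj : job_skills = []
  · simp [hj]
  · simp only [hj, if_false]
    set p : String → Bool := fun skill =>
      job_skills.any (fun js =>
        PySem.Str.isIn (PySem.Str.lower skill) (PySem.Str.lower js) ||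
        PySem.Str.isIn (PySem.Str.lower js) (PySem.Str.lower skill)) with hp
    have hkey : (fun s => !hms_matches (job_skills.map PySem.Str.lower) s) = (fun s => !p s) := by
      funext s
      simp [hms_matches, List.any_map, hp, Function.comp_def, PySem.Str.toList_lower]
    rw [hkey, hms_sorted_bool_key, hms_foldl_buckets p user_skills [] []]
    simp
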